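-- pv_equiv track=rewrite | github.com/marcomasoero/AlphaBot_Masoero_Pollicino | server.py | controlla_numero
-- ===== SOURCE A (Python) =====
-- def controlla_numero(string):
--     lista_numeri = "0123456789"
--     punto = False
--     if string == '':
--         return False
--     for char in string:
--         if char not in lista_numeri:
--             if char == '.':
--                 if punto == True:
--                     return False
--                 punto = True
--             else:
--                return False
--     return True
-- ===== SOURCE B (Python) =====
-- def controlla_numero(string):
--     if string == '':
--         return False
--     if not all(c in "0123456789." for c in string):
--         return False
--     return string.count('.') <= 1
-- ===== Notes on version B (the rewrite author's own statement) =====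
-- stated objective: simpler
-- what changed: Replaces A's single stateful scan (a dot-seen flag with early returns) by two independent stateless passes: an all() membership scan over the allowed digit/dot characters followed by a check that the dot count is at most one.
import Mathlib
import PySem

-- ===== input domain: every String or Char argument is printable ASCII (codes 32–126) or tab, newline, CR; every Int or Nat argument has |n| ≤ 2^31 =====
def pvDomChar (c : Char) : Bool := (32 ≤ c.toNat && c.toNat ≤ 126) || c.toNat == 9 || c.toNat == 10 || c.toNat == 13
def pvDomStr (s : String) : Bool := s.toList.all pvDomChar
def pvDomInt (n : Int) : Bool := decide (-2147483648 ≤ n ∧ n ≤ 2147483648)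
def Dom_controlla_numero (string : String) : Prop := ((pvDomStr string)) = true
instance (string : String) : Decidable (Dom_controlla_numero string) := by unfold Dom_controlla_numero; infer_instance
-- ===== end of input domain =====

-- B replaces A's single stateful scan (dot-seen flag, early returns) by two independent
-- passes: a membership scan over "0123456789." then a dot count; objective: simpler.
-- ===== PORT A =====
-- the loop of A: early 'return False' modelled by the Bool result; 'punto' is the dot-seen flag
def controllaLoop : List Char → Bool → Bool
  | [], _ => true
  | c :: cs, punto =>
    if c ∉ "0123456789".toList then
      if c = '.' then
        if punto = true then false else controllaLoop cs true
      else false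
    else controllaLoop cs punto

def controlla_numero (string : String) : Bool :=
  if string = "" then false else controllaLoop string.toList false

-- ===== PORT B =====
def controlla_numero_alt (string : String) : Bool :=
  if string = "" then false
  else if ¬ (string.toList.all (fun c => c ∈ "0123456789.".toList)) then false
  else decide (string.toList.count '.' ≤ 1)

-- ===== PRECONDITION & SPEC =====
def Spec_controlla_numero (string : String) (out : Bool) : Prop := out = controlla_numero_alt string
instance (string : String) (out : Bool) : Decidable (Spec_controlla_numero string out) := by unfold Spec_controlla_numero; infer_instance

-- ===== CLAIM (what is proved, stated in full; the proofs are below) =====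
def Claim_equal_controlla_numero : Prop := ∀ (string : String), Dom_controlla_numero string → Spec_controlla_numero string (controlla_numero string)

-- ===== LEMMAS AND PROOFS =====

-- ===== VERDICT (by name: the statement is the Claim_ definition above) =====
-- helper (proofs only): the char test shared by both programs, kept opaque so simp
-- does not expand the literal string membership
def okChar (c : Char) : Bool := c ∈ "0123456789.".toList

theorem okChar_iff (c : Char) :
    okChar c = (decide (c ∈ "0123456789".toList) || decide (c = '.')) := by
  have h : "0123456789.".toList = "0123456789".toList ++ ['.'] := by decide
  simp [okChar, h, Bool.or_assoc]

-- characterisation of A's loop: success iff every char is a digit or dot, with at most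
-- (1 - punto) dots remaining
theorem controllaLoop_eq (cs : List Char) (punto : Bool) :
    controllaLoop cs punto =
      (cs.all okChar && decide (cs.count '.' ≤ (if punto then 0 else 1))) := by
  induction cs generalizing punto with
  | nil => cases punto <;> decide
  | cons c cs ih =>
    rw [List.all_cons]
    by_cases hd : c = '.'
    · subst hd
      have hnm : ('.' : Char) ∉ "0123456789".toList := by decide
      have hok : okChar '.' = true := by decide
      rw [hok, Bool.true_and]
      have hc : List.count '.' ('.' :: cs) = List.count '.' cs + 1 := by
        simp [List.count_cons]
      cases punto
      · have he : (List.count '.' cs + 1 ≤ 1) = (List.count '.' cs ≤ 0) :=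
          propext (by omega)
        simp [controllaLoop, ih, hc, he]
      · have he : ¬ (List.count '.' cs + 1 ≤ 0) := by omega
        simp [controllaLoop, hc, he]
    · have hc : List.count '.' (c :: cs) = List.count '.' cs := by
        simp [List.count_cons, hd]
      by_cases hm : c ∈ "0123456789".toList
      · have hok : okChar c = true := by
          rw [okChar_iff]; simp; exact Or.inl (by simpa using hm)
        simp only [controllaLoop]
        rw [if_neg (not_not_intro hm), ih, hc, hok, Bool.true_and]
      · have hok : okChar c = false := by
          rw [okChar_iff]; simp [hd]; simpa using hm
        simp only [controllaLoop]
        rw [if_pos hm, if_neg hd, hc, hok]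
        simp

theorem controlla_numero_spec : Claim_equal_controlla_numero := by
  intro s _
  unfold Spec_controlla_numero controlla_numero controlla_numero_alt
  by_cases h : s = ""
  · simp [h]
  · have hall : (s.toList.all fun c => c ∈ "0123456789.".toList) = s.toList.all okChar := rfl
    simp only [h, if_neg h, controllaLoop_eq, hall]
    cases ha : s.toList.all okChar <;> simp [ha]
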